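-- pv_equiv track=rewrite | github.com/iamslash/learntocode | leetcode/DivideArrayIntoIncreasingSequences/a.py | canDivideIntoSubsequences
-- ===== SOURCE A (Python) =====
-- def canDivideIntoSubsequences(A, K) -> bool:
--     n, d, l = len(A), 1, 1
--     for i in range(1, n):
--         if (A[i-1] == A[i]):
--             l += 1
--         else:
--             l = 1
--         d = max(d, l)
--     return n >= d * K
-- ===== SOURCE B (Python) =====
-- def canDivideIntoSubsequences(A, K) -> bool:
--     n = len(A)
--     cuts = [0] + [i for i in range(1, n) if A[i - 1] != A[i]] + [n]
--     d = max([1] + [b - a for a, b in zip(cuts, cuts[1:])])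
--     return n >= d * K
-- ===== Notes on version B (the rewrite author's own statement) =====
-- stated objective: alternative
-- what changed: Replaces the running run-length/branching accumulator with a declarative formulation: collect the cut positions where adjacent elements differ, take the max of pairwise differences of consecutive cuts (clamped to 1), and compare n >= d*K.
import Mathlib
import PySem

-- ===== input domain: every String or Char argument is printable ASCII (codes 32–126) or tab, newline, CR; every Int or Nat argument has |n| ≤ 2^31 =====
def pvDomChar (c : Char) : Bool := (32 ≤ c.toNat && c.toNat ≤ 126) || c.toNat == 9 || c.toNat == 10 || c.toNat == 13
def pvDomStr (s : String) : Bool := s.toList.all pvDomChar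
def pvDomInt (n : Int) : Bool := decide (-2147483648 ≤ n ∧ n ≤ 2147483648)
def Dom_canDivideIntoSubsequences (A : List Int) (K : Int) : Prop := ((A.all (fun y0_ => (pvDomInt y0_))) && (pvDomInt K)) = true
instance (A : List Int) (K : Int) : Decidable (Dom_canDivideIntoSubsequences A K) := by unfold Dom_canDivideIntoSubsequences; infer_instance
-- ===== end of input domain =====

-- B replaces A's running run-length/branch accumulator with a declarative cut-position
-- formulation (cut indices, pairwise differences, max); alternative, not claimed faster.

-- ===== PORT A =====
def canDivideIntoSubsequences (A : List Int) (K : Int) : Bool :=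
  let n : Int := A.length
  let s := (PySem.List.pyRange 1 n 1).foldl
    (fun (s : Int × Int) i =>
      let l := if PySem.List.pyGetD A (i - 1) 0 == PySem.List.pyGetD A i 0 then s.2 + 1 else 1
      (max s.1 l, l)) ((1 : Int), (1 : Int))
  decide (n ≥ s.1 * K)

-- ===== PORT B =====
-- cuts[1:] is ported as cuts.drop 1 (exact: PySem.List.slice_from_one);
-- max([1] + diffs) is ported as diffs.foldl max 1 (exact: PySem.List.max?_id_cons).
def canDivideIntoSubsequences_alt (A : List Int) (K : Int) : Bool :=
  let n : Int := A.length
  let cuts : List Int :=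
    0 :: (PySem.List.pyRange 1 n 1).filter
      (fun i => !(PySem.List.pyGetD A (i - 1) 0 == PySem.List.pyGetD A i 0)) ++ [n]
  let d : Int := ((cuts.zip (cuts.drop 1)).map (fun p => p.2 - p.1)).foldl max 1
  decide (n ≥ d * K)

-- ===== PRECONDITION & SPEC =====
def Spec_canDivideIntoSubsequences (A : List Int) (K : Int) (out : Bool) : Prop := out = canDivideIntoSubsequences_alt A K
instance (A : List Int) (K : Int) (out : Bool) : Decidable (Spec_canDivideIntoSubsequences A K out) := by unfold Spec_canDivideIntoSubsequences; infer_instance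

-- ===== CLAIM (what is proved, stated in full; the proofs are below) =====
def Claim_equal_canDivideIntoSubsequences : Prop := ∀ (A : List Int) (K : Int), Dom_canDivideIntoSubsequences A K → Spec_canDivideIntoSubsequences A K (canDivideIntoSubsequences A K)

-- ===== LEMMAS AND PROOFS =====

-- pairwise differences of consecutive elements, as B computes them
def pvDif (c : List Int) : List Int := (c.zip (c.drop 1)).map (fun p => p.2 - p.1)

theorem pvDif_cons_cons (a b : Int) (t : List Int) :
    pvDif (a :: b :: t) = (b - a) :: pvDif (b :: t) := by
  simp [pvDif]

theorem pvDif_snoc (a : Int) (t : List Int) (v : Int) :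
    pvDif ((a :: t) ++ [v]) = pvDif (a :: t) ++ [v - (a :: t).getLastD 0] := by
  induction t generalizing a with
  | nil => simp [pvDif]
  | cons b t ih =>
      have := ih b
      simp only [List.cons_append] at *
      rw [pvDif_cons_cons, pvDif_cons_cons, this]
      simp

theorem foldl_max_snoc (L : List Int) (v : Int) :
    (L ++ [v]).foldl max 1 = max (L.foldl max 1) v := by
  simp [List.foldl_append]

-- pyGetD on an in-range index ignores an appended tail element
theorem pvGetD_append_left (A : List Int) (y : Int) (i : Int)
    (h0 : 0 ≤ i) (h1 : i < (A.length : Int)) :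
    PySem.List.pyGetD (A ++ [y]) i 0 = PySem.List.pyGetD A i 0 := by
  rw [PySem.List.pyGetD_eq_getElem (A ++ [y]) 0 h0 (by simp; omega),
      PySem.List.pyGetD_eq_getElem A 0 h0 h1]
  rw [List.getElem_append_left (by omega)]

-- the loop body of port A, as a named function
def pvStep (A : List Int) : (Int × Int) → Int → (Int × Int) :=
  fun s i =>
    let l := if PySem.List.pyGetD A (i - 1) 0 == PySem.List.pyGetD A i 0 then s.2 + 1 else 1
    (max s.1 l, l)

-- the break-position list of port B
def pvF (A : List Int) : List Int :=
  (PySem.List.pyRange 1 (A.length : Int) 1).filter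
    (fun i => !(PySem.List.pyGetD A (i - 1) 0 == PySem.List.pyGetD A i 0))

-- the loop invariant: A's fold state = (max of B's pairwise cut differences, length of current run)
theorem pvInvariant (A : List Int) (hA : A ≠ []) :
    (PySem.List.pyRange 1 (A.length : Int) 1).foldl (pvStep A) (1, 1) =
      ((pvDif ((0 :: pvF A) ++ [(A.length : Int)])).foldl max 1,
       (A.length : Int) - (0 :: pvF A).getLastD 0) := by
  induction A using List.reverseRecOn with
  | nil => exact absurd rfl hA
  | append_singleton A y ih =>
      rcases eq_or_ne A [] with hA0 | hne
      · subst hA0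
        simp [pvF, pvDif, PySem.List.pyRange]
      · have hlen : (1 : Int) ≤ (A.length : Int) := by
          have := List.length_pos_iff.mpr hne; omega
        have hlen2 : ((A ++ [y]).length : Int) = (A.length : Int) + 1 := by simp
        -- split the range
        have hrange : PySem.List.pyRange 1 ((A ++ [y]).length : Int) 1 =
            PySem.List.pyRange 1 (A.length : Int) 1 ++ [(A.length : Int)] := by
          rw [hlen2, PySem.List.pyRange_one_succ_right hlen]
        -- step function agrees on old indices
        have hstep : (PySem.List.pyRange 1 (A.length : Int) 1).foldl (pvStep (A ++ [y])) (1, 1) =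
            (PySem.List.pyRange 1 (A.length : Int) 1).foldl (pvStep A) (1, 1) := by
          apply PySem.List.foldl_congr_mem
          intro acc x hx
          rw [PySem.List.mem_pyRange_one] at hx
          simp only [pvStep]
          rw [pvGetD_append_left A y (x - 1) (by omega) (by omega),
              pvGetD_append_left A y x (by omega) (by omega)]
        -- filter agrees on old indices
        have hfilt : pvF (A ++ [y]) =
            pvF A ++ (if !(PySem.List.pyGetD (A ++ [y]) ((A.length : Int) - 1) 0 ==
                PySem.List.pyGetD (A ++ [y]) (A.length : Int) 0) then [(A.length : Int)] else []) := by
          unfold pvF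
          rw [hlen2, PySem.List.pyRange_one_succ_right hlen, List.filter_append]
          congr 1
          · apply List.filter_congr
            intro x hx
            rw [PySem.List.mem_pyRange_one] at hx
            rw [pvGetD_append_left A y (x - 1) (by omega) (by omega),
                pvGetD_append_left A y x (by omega) (by omega)]
          · rw [List.filter_singleton]
            cases (!PySem.List.pyGetD (A ++ [y]) ((A.length : Int) - 1) 0 ==
                PySem.List.pyGetD (A ++ [y]) (A.length : Int) 0) <;> simp
        rw [hrange, List.foldl_append, hstep, ih hne]
        set n : Int := (A.length : Int) with hn
        set lp : Int := (0 :: pvF A).getLastD 0 with hlp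
        by_cases hc : PySem.List.pyGetD (A ++ [y]) (n - 1) 0 == PySem.List.pyGetD (A ++ [y]) n 0
        · -- same element: run extends, cuts unchanged
          have hF : pvF (A ++ [y]) = pvF A := by rw [hfilt, hc]; simp
          simp only [List.foldl, pvStep, hc, if_true]
          rw [hlen2, hF]
          have h1 := pvDif_snoc 0 (pvF A) n
          have h2 := pvDif_snoc 0 (pvF A) (n + 1)
          simp only [List.cons_append] at h1 h2 ⊢
          rw [h1, h2]; simp only [foldl_max_snoc]
          simp only [Prod.mk.injEq, ← hlp]
          constructor <;> omega
        · -- different element: new cut at n, run restarts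
          have hF : pvF (A ++ [y]) = pvF A ++ [n] := by
            rw [hfilt]; simp only [hc]; simp
          simp only [List.foldl, pvStep, hc, if_false, Bool.false_eq_true]
          rw [hlen2, hF]
          have h1 := pvDif_snoc 0 (pvF A) n
          have h2 := pvDif_snoc 0 (pvF A ++ [n]) (n + 1)
          have hlast : (0 :: (pvF A ++ [n])).getLastD 0 = n := by
            rw [← List.cons_append, List.getLastD_concat]
          rw [hlast] at h2
          simp only [List.cons_append] at h1 h2 ⊢
          rw [h2, h1]; simp only [foldl_max_snoc]
          simp only [Prod.mk.injEq, ← hlp]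
          constructor <;> omega

-- ===== VERDICT (by name: the statement is the Claim_ definition above) =====
theorem canDivideIntoSubsequences_spec : Claim_equal_canDivideIntoSubsequences := by
  intro A K _
  unfold Spec_canDivideIntoSubsequences canDivideIntoSubsequences canDivideIntoSubsequences_alt
  cases hA : A with
  | nil => simp [PySem.List.pyRange]
  | cons a t =>
      have hne : A ≠ [] := by simp [hA]
      have h := pvInvariant A hne
      rw [← hA]
      simp only []
      have hfold : (PySem.List.pyRange 1 (A.length : Int) 1).foldl
          (fun (s : Int × Int) i =>
            let l := if PySem.List.pyGetD A (i - 1) 0 == PySem.List.pyGetD A i 0 then s.2 + 1 else 1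
            (max s.1 l, l)) ((1 : Int), (1 : Int)) =
          (PySem.List.pyRange 1 (A.length : Int) 1).foldl (pvStep A) (1, 1) := rfl
      rw [hfold, h]
      rfl
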